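-- pv_equiv track=rewrite | github.com/MatisseBE/LARA-Configurator | extra_functions/Create_LARA-config_old2.py | TSAreaActivationToStandardFormat
-- ===== SOURCE A (Python) =====
-- def TSAreaActivationToStandardFormat(rules):
--     notams = []
--     eaup = []
--     schedules = []
--     controllers = []
--
--     for rule in rules:
--         if rule == "1":
--             schedules.append("0101:1231::0000:2359:") #always active
--         elif rule.startswith("NOTAM"):
--             r = rule.replace("NOTAM:","")[5:] #Hide fir and :
--             notams.append(r)
--         elif rule.startswith("AUP"):
--             r = rule.replace("AUP:","")
--             eaup.append(r)
--         elif rule.startswith("ID"):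
--             r = rule.replace("ID:","")
--             controllers.append(r)
--
--         else:
--             schedules.append(rule)
--
--     activation = {
--         "NOTAM" : notams,
--         "EAUP" : eaup,
--         "ControllerID" : controllers,
--         "Schedules" : schedules
--     }
--     return activation
-- ===== SOURCE B (Python) =====
-- def TSAreaActivationToStandardFormat(rules):
--     notams = [r.replace("NOTAM:", "")[5:] for r in rules if r.startswith("NOTAM")]
--     eaup = [r.replace("AUP:", "") for r in rules if r.startswith("AUP")]
--     controllers = [r.replace("ID:", "") for r in rules if r.startswith("ID")]
--     schedules = ["0101:1231::0000:2359:" if r == "1" else r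
--                  for r in rules
--                  if r == "1" or not (r.startswith("NOTAM") or r.startswith("AUP") or r.startswith("ID"))]
--     return {"NOTAM": notams, "EAUP": eaup, "ControllerID": controllers, "Schedules": schedules}
-- ===== Notes on version B (the rewrite author's own statement) =====
-- stated objective: alternative
-- what changed: A's single loop that dispatches each rule into one of four accumulators is replaced by four independent filter-and-map passes over rules, one per output category, assembled into the dict at the end.
import Mathlib
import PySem

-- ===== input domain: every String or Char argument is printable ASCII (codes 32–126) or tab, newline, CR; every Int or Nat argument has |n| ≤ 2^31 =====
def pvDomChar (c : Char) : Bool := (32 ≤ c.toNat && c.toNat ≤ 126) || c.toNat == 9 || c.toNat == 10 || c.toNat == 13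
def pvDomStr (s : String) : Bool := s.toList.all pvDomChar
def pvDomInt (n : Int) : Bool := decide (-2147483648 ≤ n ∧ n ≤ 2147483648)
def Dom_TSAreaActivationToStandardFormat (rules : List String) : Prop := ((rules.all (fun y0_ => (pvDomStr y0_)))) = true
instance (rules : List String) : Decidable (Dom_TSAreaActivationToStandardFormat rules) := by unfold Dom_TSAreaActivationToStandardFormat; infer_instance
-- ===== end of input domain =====

-- B replaces A's single four-way branching loop by four independent filter-and-map passes,
-- one per output category (objective: alternative decomposition, same cost).

-- ===== PORT A =====
-- the loop body, one step per rule, over the state (notams, eaup, schedules, controllers)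
def pvStepA (st : List String × List String × List String × List String) (rule : String) :
    List String × List String × List String × List String :=
  let (notams, eaup, schedules, controllers) := st
  if rule == "1" then
    (notams, eaup, schedules ++ ["0101:1231::0000:2359:"], controllers)
  else if PySem.Str.startswith rule "NOTAM" then
    (notams ++ [PySem.Str.slice (PySem.Str.replace rule "NOTAM:" "") (some 5) none], eaup, schedules, controllers)
  else if PySem.Str.startswith rule "AUP" then
    (notams, eaup ++ [PySem.Str.replace rule "AUP:" ""], schedules, controllers)
  else if PySem.Str.startswith rule "ID" then
    (notams, eaup, schedules, controllers ++ [PySem.Str.replace rule "ID:" ""])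
  else
    (notams, eaup, schedules ++ [rule], controllers)

def TSAreaActivationToStandardFormat (rules : List String) : List (String × List String) :=
  let st := rules.foldl pvStepA ([], [], [], [])
  [("NOTAM", st.1), ("EAUP", st.2.1), ("ControllerID", st.2.2.2), ("Schedules", st.2.2.1)]

-- ===== PORT B =====
def pvNotamsB (rules : List String) : List String :=
  (rules.filter (fun r => PySem.Str.startswith r "NOTAM")).map
    (fun r => PySem.Str.slice (PySem.Str.replace r "NOTAM:" "") (some 5) none)

def pvEaupB (rules : List String) : List String :=
  (rules.filter (fun r => PySem.Str.startswith r "AUP")).map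
    (fun r => PySem.Str.replace r "AUP:" "")

def pvControllersB (rules : List String) : List String :=
  (rules.filter (fun r => PySem.Str.startswith r "ID")).map
    (fun r => PySem.Str.replace r "ID:" "")

def pvSchedulesB (rules : List String) : List String :=
  (rules.filter (fun r => r == "1" ||
      !(PySem.Str.startswith r "NOTAM" || PySem.Str.startswith r "AUP" || PySem.Str.startswith r "ID"))).map
    (fun r => if r == "1" then "0101:1231::0000:2359:" else r)

def TSAreaActivationToStandardFormat_alt (rules : List String) : List (String × List String) :=
  [("NOTAM", pvNotamsB rules), ("EAUP", pvEaupB rules),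
   ("ControllerID", pvControllersB rules), ("Schedules", pvSchedulesB rules)]

-- ===== PRECONDITION & SPEC =====
def Spec_TSAreaActivationToStandardFormat (rules : List String) (out : List (String × List String)) : Prop := out = TSAreaActivationToStandardFormat_alt rules
instance (rules : List String) (out : List (String × List String)) : Decidable (Spec_TSAreaActivationToStandardFormat rules out) := by unfold Spec_TSAreaActivationToStandardFormat; infer_instance

-- ===== CLAIM (what is proved, stated in full; the proofs are below) =====
def Claim_equal_TSAreaActivationToStandardFormat : Prop := ∀ (rules : List String), Dom_TSAreaActivationToStandardFormat rules → Spec_TSAreaActivationToStandardFormat rules (TSAreaActivationToStandardFormat rules)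

-- ===== LEMMAS AND PROOFS =====

-- the three recognized prefixes are mutually exclusive
lemma pv_sw_excl (s : String) (p q : String)
    (hpq : ¬ p.toList <+: q.toList) (hqp : ¬ q.toList <+: p.toList)
    (h : PySem.Str.startswith s p = true) : PySem.Str.startswith s q = false := by
  by_contra hq
  rw [Bool.not_eq_false] at hq
  rw [PySem.Str.startswith_eq, PySem.Chars.startswith_iff] at h hq
  rcases List.prefix_or_prefix_of_prefix h hq with h' | h'
  · exact hpq h'
  · exact hqp h'

lemma pv_fold_eq (rules : List String) : ∀ (n e s c : List String),
    rules.foldl pvStepA (n, e, s, c) =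
      (n ++ pvNotamsB rules, e ++ pvEaupB rules, s ++ pvSchedulesB rules, c ++ pvControllersB rules) := by
  induction rules with
  | nil => intro n e s c; simp [pvNotamsB, pvEaupB, pvSchedulesB, pvControllersB]
  | cons r rs ih =>
    intro n e s c
    by_cases h1 : r = "1"
    · subst h1
      simp only [List.foldl_cons, pvStepA, pvNotamsB, pvEaupB, pvSchedulesB, pvControllersB,
        List.filter_cons] at *
      norm_num [ih,
        show PySem.Chars.startswith "1".toList "NOTAM".toList = false from by decide,
        show PySem.Chars.startswith "1".toList "AUP".toList = false from by decide,
        show PySem.Chars.startswith "1".toList "ID".toList = false from by decide]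
    · have hb1 : (r == "1") = false := by simp [h1]
      by_cases h2 : PySem.Str.startswith r "NOTAM" = true
      · have ha : PySem.Str.startswith r "AUP" = false :=
          pv_sw_excl r "NOTAM" "AUP" (by decide) (by decide) h2
        have hi : PySem.Str.startswith r "ID" = false :=
          pv_sw_excl r "NOTAM" "ID" (by decide) (by decide) h2
        simp only [List.foldl_cons, pvStepA, pvNotamsB, pvEaupB, pvSchedulesB, pvControllersB,
          List.filter_cons, hb1, h2, ha, hi] at *
        norm_num [ih]
      · by_cases h3 : PySem.Str.startswith r "AUP" = true
        · have hi : PySem.Str.startswith r "ID" = false :=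
            pv_sw_excl r "AUP" "ID" (by decide) (by decide) h3
          simp only [List.foldl_cons, pvStepA, pvNotamsB, pvEaupB, pvSchedulesB, pvControllersB,
            List.filter_cons, hb1, h2, h3, hi] at *
          norm_num [ih]
        · by_cases h4 : PySem.Str.startswith r "ID" = true
          · simp only [List.foldl_cons, pvStepA, pvNotamsB, pvEaupB, pvSchedulesB, pvControllersB,
              List.filter_cons, hb1, h2, h3, h4] at *
            norm_num [ih]
          · simp only [List.foldl_cons, pvStepA, pvNotamsB, pvEaupB, pvSchedulesB, pvControllersB,
              List.filter_cons, hb1, h2, h3, h4] at *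
            norm_num [ih, h1]

-- ===== VERDICT (by name: the statement is the Claim_ definition above) =====
theorem TSAreaActivationToStandardFormat_spec : Claim_equal_TSAreaActivationToStandardFormat := by
  intro rules _
  show _ = _
  simp [TSAreaActivationToStandardFormat, TSAreaActivationToStandardFormat_alt, pv_fold_eq]
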